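-- pv_equiv track=rewrite | github.com/rishabhranawat/challenge | leetcode/search_in_sorted_array.py | search
-- ===== SOURCE A (Python) =====
-- def search(nums, target):
--     """
--     :type nums: List[int]
--     :type target: int
--     :rtype: int
--     """
--     n = len(nums)
--     if(n == 0): return -1
--     visited = set()
--
--     counter = 0
--     val = nums[counter]
--     while(val not in visited):
--         visited.add(val)
--         if(val == target):
--             return counter % n
--         else:
--             counter += 1
--             counter = counter % n
--             val = nums[counter]
--     return -1
-- ===== SOURCE B (Python) =====
-- def search(nums, target):
--     # Build the maximal distinct leading prefix (stop at the first repeated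
--     # value), then search that prefix for target in a separate pass.
--     seen = set()
--     prefix = []
--     for v in nums:
--         if v in seen:
--             break
--         seen.add(v)
--         prefix.append(v)
--     for i, v in enumerate(prefix):
--         if v == target:
--             return i
--     return -1
-- ===== Notes on version B (the rewrite author's own statement) =====
-- stated objective: simpler
-- what changed: Replaced A's single circular-index while loop with modular counter arithmetic and an interleaved duplicate/target test by two plain passes: first build the distinct leading prefix (break on the first repeated value), then search that prefix for the target.
import Mathlib
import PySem

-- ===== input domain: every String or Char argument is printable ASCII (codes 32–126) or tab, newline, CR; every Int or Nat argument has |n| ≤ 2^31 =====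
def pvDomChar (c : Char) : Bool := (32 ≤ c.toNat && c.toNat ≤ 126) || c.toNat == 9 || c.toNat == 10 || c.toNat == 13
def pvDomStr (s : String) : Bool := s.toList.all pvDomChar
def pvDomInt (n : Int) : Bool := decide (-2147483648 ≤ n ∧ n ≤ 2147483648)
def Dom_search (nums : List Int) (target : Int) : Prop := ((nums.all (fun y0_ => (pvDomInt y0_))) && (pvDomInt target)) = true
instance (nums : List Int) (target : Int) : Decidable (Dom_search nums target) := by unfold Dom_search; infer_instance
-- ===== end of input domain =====

-- B replaces A's circular modular-counter while loop by two plain passes (build the distinct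
-- leading prefix, then search it for the target): a simpler decomposition, same O(n) cost.


-- ===== PORT A =====
-- A's while loop, transliterated with a fuel parameter (nums.length + 1 condition
-- checks always suffice: the counter walks 0..n-1 and a wrap revisits nums[0]).
-- nums[counter] is ported as pyGetD (exact: counter is always in range 0..n-1).
def searchLoop (nums : List Int) (n target : Int) (visited : PySem.Set Int)
    (counter val : Int) : Nat → Int
  | 0 => -1
  | fuel + 1 =>
    if PySem.Set.contains visited val then -1
    else
      let visited := PySem.Set.add visited val
      if val = target then PySem.Int.mod counter n
      else
        let counter := PySem.Int.mod (counter + 1) n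
        searchLoop nums n target visited counter (PySem.List.pyGetD nums counter 0) fuel

def search (nums : List Int) (target : Int) : Int :=
  let n : Int := nums.length
  if n = 0 then -1
  else searchLoop nums n target PySem.Set.empty 0 (PySem.List.pyGetD nums 0 0) (nums.length + 1)

-- ===== PORT B =====
-- pass 1: the maximal distinct leading prefix (break on first repeated value)
def buildPrefix (seen : PySem.Set Int) : List Int → List Int
  | [] => []
  | v :: rest =>
    if PySem.Set.contains seen v then []
    else v :: buildPrefix (PySem.Set.add seen v) rest

-- pass 2: first index of target (enumerate), -1 if absent
def findIdx (target i : Int) : List Int → Int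
  | [] => -1
  | v :: rest => if v = target then i else findIdx target (i + 1) rest

def search_alt (nums : List Int) (target : Int) : Int :=
  findIdx target 0 (buildPrefix PySem.Set.empty nums)

-- ===== PRECONDITION & SPEC =====
def Spec_search (nums : List Int) (target : Int) (out : Int) : Prop := out = search_alt nums target
instance (nums : List Int) (target : Int) (out : Int) : Decidable (Spec_search nums target out) := by unfold Spec_search; infer_instance

-- ===== CLAIM (what is proved, stated in full; the proofs are below) =====
def Claim_equal_search : Prop := ∀ (nums : List Int) (target : Int), Dom_search nums target → Spec_search nums target (search nums target)

-- ===== LEMMAS AND PROOFS =====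

-- ===== VERDICT (by name: the statement is the Claim_ definition above) =====
lemma loop_eq (nums : List Int) (target : Int) :
    ∀ (fuel i : Nat) (seen : PySem.Set Int),
      i < nums.length → nums.length - i < fuel →
      (∀ x ∈ nums.take i, x ∈ seen) →
      searchLoop nums (nums.length : Int) target seen (i : Int)
          (PySem.List.pyGetD nums (i : Int) 0) fuel
        = findIdx target (i : Int) (buildPrefix seen (nums.drop i)) := by
  intro fuel
  induction fuel with
  | zero => intro i seen hi hf hinv; omega
  | succ f ih =>
    intro i seen hi hf hinv
    have hget : PySem.List.pyGetD nums (i : Int) 0 = nums[i] := by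
      simp [List.getD_eq_getElem?_getD, hi]
    have hdrop : nums.drop i = nums[i] :: nums.drop (i + 1) :=
      List.drop_eq_getElem_cons hi
    rw [hget, hdrop]
    simp only [searchLoop, buildPrefix]
    by_cases hmem : nums[i] ∈ seen
    · simp [hmem, findIdx]
    · have hcf : PySem.Set.contains seen nums[i] = false := by
        rw [Bool.eq_false_iff]
        intro hc; exact hmem ((PySem.Set.contains_iff _ _).mp hc)
      simp only [hcf, Bool.false_eq_true, if_false]
      by_cases htar : nums[i] = target
      · have hmod : PySem.Int.mod (i : Int) (nums.length : Int) = (i : Int) := by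
          rw [PySem.Int.mod_eq_emod_of_pos (by exact_mod_cast (by omega : 0 < nums.length))]
          exact Int.emod_eq_of_lt (by positivity) (by exact_mod_cast hi)
        simp [htar, findIdx, hmod]
      · simp only [htar, if_false, findIdx]
        have hmodc : PySem.Int.mod ((i : Int) + 1) (nums.length : Int)
            = (((i + 1) % nums.length : Nat) : Int) := by
          have hc : ((i : Int) + 1) = ((i + 1 : Nat) : Int) := by push_cast; ring
          rw [hc, PySem.Int.mod_natCast]
        rw [hmodc]
        by_cases hlt : i + 1 < nums.length
        · rw [Nat.mod_eq_of_lt hlt]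
          have hinv' : ∀ x ∈ nums.take (i + 1), x ∈ PySem.Set.add seen nums[i] := by
            intro x hx
            rw [List.take_add_one] at hx
            rcases List.mem_append.mp hx with h | h
            · exact (PySem.Set.mem_add _ _ _).mpr (Or.inl (hinv x h))
            · simp [hi] at h
              exact (PySem.Set.mem_add _ _ _).mpr (Or.inr h)
          rw [ih (i + 1) (PySem.Set.add seen nums[i]) hlt (by omega) hinv']
          push_cast
          ring_nf
        · have hlen : i + 1 = nums.length := by omega
          rw [show (i + 1) % nums.length = 0 by rw [hlen, Nat.mod_self]]
          obtain ⟨f', rfl⟩ : ∃ f', f = f' + 1 := ⟨f - 1, by omega⟩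
          have h0 : nums[0]'(by omega) ∈ PySem.Set.add seen nums[i] := by
            rcases Nat.eq_zero_or_pos i with h | h
            · refine (PySem.Set.mem_add _ _ _).mpr (Or.inr ?_)
              subst h; rfl
            · refine (PySem.Set.mem_add _ _ _).mpr (Or.inl (hinv (nums[0]'(by omega)) ?_))
              have hte : (nums.take i)[0]'(by simp; omega) = nums[0]'(by omega) :=
                List.getElem_take
              rw [← hte]; exact List.getElem_mem _
          have hget0 : PySem.List.pyGetD nums (((0 : Nat)) : Int) 0 = nums[0]'(by omega) := by
            rw [Nat.cast_zero, PySem.List.pyGetD_zero, List.getD_eq_getElem?_getD,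
              List.getElem?_eq_getElem (by omega : 0 < nums.length)]
            rfl
          have hc : PySem.Set.contains (PySem.Set.add seen nums[i])
              (PySem.List.pyGetD nums (((0 : Nat)) : Int) 0) = true := by
            rw [hget0]; exact (PySem.Set.contains_iff _ _).mpr h0
          have hdrop1 : nums.drop (i + 1) = [] := by rw [hlen]; exact List.drop_length
          simp only [searchLoop, hc, if_true, hdrop1, buildPrefix, findIdx]

theorem search_spec : Claim_equal_search := by
  unfold Claim_equal_search
  intro nums target _
  unfold Spec_search search search_alt
  cases nums with
  | nil => simp [buildPrefix, findIdx]
  | cons a l =>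
    have hlen : (a :: l).length ≠ 0 := by simp
    have h := loop_eq (a :: l) target ((a :: l).length + 1) 0 PySem.Set.empty
      (by simp) (by omega) (by simp)
    simp only [Nat.cast_zero, List.drop_zero] at h
    rw [if_neg (by exact_mod_cast hlen)]
    exact h
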